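-- pv_equiv track=rewrite | github.com/nilin/cancellations | cancellations/utilities/textutil.py | placelabels
-- ===== SOURCE A (Python) =====
-- from collections import deque
--
-- def placelabels(positions,labels):
--
--     if type(labels)!=list: labels=len(positions)*[labels]
--     positions,labels=[deque(_) for _ in zip(*sorted(zip(positions,labels)))]
--     s=''
--
--     for i in range(positions[-1]+1):
--         while positions[0]<=i:
--             s=s[:i]+str(labels.popleft())
--             positions.popleft()
--             if len(positions)==0: return s
--         s+=' '
--
--     return s
-- ===== SOURCE B (Python) =====
-- def placelabels(positions, labels):
--     if type(labels) != list:
--         labels = len(positions) * [labels]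
--     chars = []
--     for p, lab in sorted(zip(positions, labels)):
--         i = p if p > 0 else 0
--         del chars[i:]
--         chars.extend(' ' * (i - len(chars)))
--         chars.extend(str(lab))
--     return ''.join(chars)
-- ===== Notes on version B (the rewrite author's own statement) =====
-- stated objective: faster
-- what changed: A rebuilds the string inside a loop over every index up to the maximum position (truncating and re-concatenating the string at each step); B makes a single pass over the sorted (position, label) pairs, maintaining a char list with truncate/pad/append per pair and joining once.
-- intended difference: When every zipped position is negative and the lexicographically greatest (position, label) pair has a nonempty label, A returns '' (its loop range(max+1) is empty so every label is dropped), while B returns that greatest label placed at index 0 - the same clamp-to-0 treatment A itself gives negative positions whenever any position is nonnegative, so B's value is the intended one. — e.g. on placelabels([-3], ["x"]): A returns "", B returns "x"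
import Mathlib
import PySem

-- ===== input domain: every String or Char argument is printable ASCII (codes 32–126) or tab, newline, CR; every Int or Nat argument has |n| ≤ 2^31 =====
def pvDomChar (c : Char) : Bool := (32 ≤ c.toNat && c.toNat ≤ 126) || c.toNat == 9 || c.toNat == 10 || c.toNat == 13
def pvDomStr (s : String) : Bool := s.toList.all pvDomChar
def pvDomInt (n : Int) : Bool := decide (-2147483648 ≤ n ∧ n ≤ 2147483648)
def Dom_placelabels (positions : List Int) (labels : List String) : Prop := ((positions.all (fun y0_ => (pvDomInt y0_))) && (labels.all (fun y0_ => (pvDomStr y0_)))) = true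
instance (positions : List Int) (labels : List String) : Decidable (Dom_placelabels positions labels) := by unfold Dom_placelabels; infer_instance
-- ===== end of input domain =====

-- B replaces A's character-by-character outer loop over range(max_position+1) (quadratic string
-- rebuilding) by a single pass over the sorted (position, label) pairs with truncate/pad/append
-- on a char list; objective: faster (one pass over the pairs instead of a scan up to max position).

-- ===== PORT A =====
-- inner 'while positions[0]<=i' loop; Bool flag = the early 'return' inside the loop
def placelabelsWhile (i : Nat) (s : List Char) : List (Int × String) → List Char × List (Int × String) × Bool
  | [] => (s, [], false)
  | (p, l) :: rest =>
    if p ≤ (i : Int) then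
      let s' := s.take i ++ l.toList
      if rest.isEmpty then (s', rest, true)
      else placelabelsWhile i s' rest
    else (s, (p, l) :: rest, false)

-- outer 'for i in range(positions[-1]+1)' loop, fuel = number of remaining iterations
def placelabelsLoop : Nat → Nat → List Char → List (Int × String) → List Char
  | 0, _, s, _ => s
  | fuel + 1, i, s, ps =>
    match placelabelsWhile i s ps with
    | (s', ps', ret) => if ret then s' else placelabelsLoop fuel (i + 1) (s' ++ [' ']) ps'

def placelabels (positions : List Int) (labels : List String) : String :=
  match PySem.List.sorted2 (positions.zip labels) (fun x => x.1) (fun x => x.2) with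
  | [] => ""   -- Python raises ValueError here (unpacking an empty zip); excluded by Pre_placelabels
  | q :: qs => String.ofList (placelabelsLoop (((q :: qs).getLast (List.cons_ne_nil q qs)).1 + 1).toNat 0 [] (q :: qs))

-- ===== PORT B =====
-- one step of Source B's loop: i = p if p > 0 else 0; del chars[i:]; pad with spaces to i; append label
def pbStep (chars : List Char) (pr : Int × String) : List Char :=
  let i : Nat := (if pr.1 > 0 then pr.1 else 0).toNat
  let t := chars.take i
  t ++ List.replicate (i - t.length) ' ' ++ pr.2.toList

def placelabels_alt (positions : List Int) (labels : List String) : String :=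
  String.ofList ((PySem.List.sorted2 (positions.zip labels) (fun x => x.1) (fun x => x.2)).foldl pbStep [])

-- ===== PRECONDITION & SPEC =====
-- Pre_ excludes exactly the inputs where A raises: with an empty positions or labels list the
-- 'positions,labels = [deque(_) for _ in zip(*sorted(zip(...)))]' unpacking raises ValueError.
def Pre_placelabels (positions : List Int) (labels : List String) : Prop :=
  positions ≠ [] ∧ labels ≠ []
instance (positions : List Int) (labels : List String) : Decidable (Pre_placelabels positions labels) := by unfold Pre_placelabels; infer_instance

def pvWitness_placelabels : List Int × List String := ([0, 2], ["ab", "c"])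

-- When every zipped position is negative and the lexicographically greatest (position, label) pair
-- has a nonempty label, A returns "" (its loop range(max+1) is empty, dropping all labels), while B
-- returns that greatest label placed at index 0 — the clamp-to-0 behaviour A itself has whenever at
-- least one position is nonnegative, so B's value is the intended one.
def D_placelabels (positions : List Int) (labels : List String) : Prop :=
  (∀ pr ∈ positions.zip labels, pr.1 < 0) ∧
  ∃ pr ∈ positions.zip labels, pr.2 ≠ "" ∧
    ∀ qr ∈ positions.zip labels, qr.1 < pr.1 ∨ (qr.1 = pr.1 ∧ qr.2.toList ≤ pr.2.toList)
instance (positions : List Int) (labels : List String) : Decidable (D_placelabels positions labels) := by unfold D_placelabels; infer_instance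

def Spec_placelabels (positions : List Int) (labels : List String) (out : String) : Prop := ¬ D_placelabels positions labels → out = placelabels_alt positions labels
instance (positions : List Int) (labels : List String) (out : String) : Decidable (Spec_placelabels positions labels out) := by unfold Spec_placelabels; infer_instance

def pvDiffWitness_placelabels : List Int × List String := ([-3], ["x"])
def pvDiffWitnessOut_placelabels : String × String := ("", "x")

-- ===== CLAIM (what is proved, stated in full; the proofs are below) =====
def Claim_unchanged_placelabels : Prop := ∀ (positions : List Int) (labels : List String), Dom_placelabels positions labels → Pre_placelabels positions labels → Spec_placelabels positions labels (placelabels positions labels)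
def Claim_changed_placelabels : Prop := Dom_placelabels (pvDiffWitness_placelabels.1) (pvDiffWitness_placelabels.2) ∧ Pre_placelabels (pvDiffWitness_placelabels.1) (pvDiffWitness_placelabels.2) ∧ D_placelabels (pvDiffWitness_placelabels.1) (pvDiffWitness_placelabels.2) ∧ placelabels (pvDiffWitness_placelabels.1) (pvDiffWitness_placelabels.2) = pvDiffWitnessOut_placelabels.1 ∧ placelabels_alt (pvDiffWitness_placelabels.1) (pvDiffWitness_placelabels.2) = pvDiffWitnessOut_placelabels.2 ∧ pvDiffWitnessOut_placelabels.1 ≠ pvDiffWitnessOut_placelabels.2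
def Claim_exact_placelabels : Prop := ∀ (positions : List Int) (labels : List String), Dom_placelabels positions labels → Pre_placelabels positions labels → D_placelabels positions labels → placelabels positions labels ≠ placelabels_alt positions labels

-- ===== LEMMAS AND PROOFS =====

def pvLexLe (a b : Int × String) : Prop := a.1 < b.1 ∨ (a.1 = b.1 ∧ a.2 ≤ b.2)

theorem pvLexLe_trans {a b c : Int × String} (h1 : pvLexLe a b) (h2 : pvLexLe b c) : pvLexLe a c := by
  rcases h1 with h1 | ⟨e1, l1⟩ <;> rcases h2 with h2 | ⟨e2, l2⟩
  · exact Or.inl (h1.trans h2)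
  · exact Or.inl (e2 ▸ h1)
  · exact Or.inl (e1 ▸ h2)
  · exact Or.inr ⟨e1.trans e2, le_trans l1 l2⟩

theorem insertBy_pairwise_pvLexLe (x : Int × String) (ys : List (Int × String))
    (h : ys.Pairwise pvLexLe) :
    (PySem.List.insertBy
      (fun a b => decide (a.1 < b.1) || (!decide (b.1 < a.1) && decide (a.2 < b.2))) x ys).Pairwise pvLexLe := by
  induction ys with
  | nil => simp [PySem.List.insertBy]
  | cons y ys ih =>
    rw [PySem.List.insertBy]
    rcases List.pairwise_cons.mp h with ⟨hy, hys⟩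
    by_cases hb : (decide (x.1 < y.1) || (!decide (y.1 < x.1) && decide (x.2 < y.2))) = true
    · rw [if_pos hb]
      have hxy : pvLexLe x y := by
        simp only [Bool.or_eq_true, Bool.and_eq_true, Bool.not_eq_true', decide_eq_true_eq,
          decide_eq_false_iff_not] at hb
        rcases hb with h1 | ⟨h1, h2⟩
        · exact Or.inl h1
        · rcases lt_or_eq_of_le (not_lt.mp h1) with hlt | heq
          · exact Or.inl hlt
          · exact Or.inr ⟨heq, le_of_lt h2⟩
      exact List.pairwise_cons.mpr ⟨by
        intro z hz
        rcases List.mem_cons.mp hz with rfl | hz'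
        · exact hxy
        · exact pvLexLe_trans hxy (hy z hz'), h⟩
    · rw [if_neg hb]
      have hyx : pvLexLe y x := by
        simp only [Bool.or_eq_true, Bool.and_eq_true, Bool.not_eq_true', decide_eq_true_eq,
          decide_eq_false_iff_not, not_or, not_and] at hb
        rcases hb with ⟨h1, h2⟩
        rcases lt_or_eq_of_le (not_lt.mp h1) with hlt | heq
        · exact Or.inl hlt
        · by_cases hlt2 : y.1 < x.1
          · exact Or.inl hlt2
          · exact Or.inr ⟨heq, not_lt.mp (h2 hlt2)⟩
      refine List.pairwise_cons.mpr ⟨?_, ih hys⟩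
      intro z hz
      rcases (PySem.List.insertBy_mem_iff _ _ _ _).mp hz with rfl | hz'
      · exact hyx
      · exact hy z hz'

theorem sorted2_pairwise_pvLexLe (xs : List (Int × String)) :
    (PySem.List.sorted2 xs (fun x => x.1) (fun x => x.2)).Pairwise pvLexLe := by
  have aux : ∀ (xs acc : List (Int × String)), acc.Pairwise pvLexLe →
      (xs.foldl (fun acc x => PySem.List.insertBy
        (fun a b => decide (a.1 < b.1) || (!decide (b.1 < a.1) && decide (a.2 < b.2))) x acc) acc).Pairwise pvLexLe := by
    intro xs
    induction xs with
    | nil => intro acc h; exact h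
    | cons x xs ih => intro acc h; exact ih _ (insertBy_pairwise_pvLexLe x acc h)
  exact aux xs [] List.Pairwise.nil

theorem pairwise_getLast {α : Type} {R : α → α → Prop} (l : List α) (h : l.Pairwise R)
    (hne : l ≠ []) (z : α) (hz : z ∈ l) : z = l.getLast hne ∨ R z (l.getLast hne) := by
  induction l with
  | nil => cases hz
  | cons a t ih =>
    rcases List.pairwise_cons.mp h with ⟨ha, ht⟩
    cases t with
    | nil => left; simp at hz; simp [hz, List.getLast]
    | cons b t' =>
      rw [List.getLast_cons (by simp)]
      rcases List.mem_cons.mp hz with rfl | hz'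
      · right; exact ha _ (List.getLast_mem _)
      · exact ih ht (by simp) hz'

theorem pbStep_length (chars : List Char) (pr : Int × String) :
    (pbStep chars pr).length = (if pr.1 > 0 then pr.1 else 0).toNat + pr.2.toList.length := by
  simp [pbStep]; omega

theorem pbStep_eq (i : Nat) (chars : List Char) (m : Nat) (p : Int) (l : String)
    (hlen : i ≤ chars.length + m) (hp : p ≤ (i : Int)) (hip : 0 < i → (i : Int) ≤ p) :
    (chars ++ List.replicate m ' ').take i ++ l.toList = pbStep chars (p, l) := by
  have hidx : (if p > 0 then p else 0).toNat = i := by split <;> omega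
  simp only [pbStep, hidx]
  rw [List.take_append]
  simp [List.take_replicate, List.length_take]
  omega

theorem while_lemma (u v : List (Int × String)) (i : Nat) (chars : List Char) (m : Nat)
    (hU : ∀ pr ∈ u, pr.1 ≤ (i : Int) ∧ (0 < i → (i : Int) ≤ pr.1))
    (hV : ∀ pr ∈ v, (i : Int) < pr.1)
    (hlen : i ≤ chars.length + m) :
    placelabelsWhile i (chars ++ List.replicate m ' ') (u ++ v) =
      (if u.isEmpty then chars ++ List.replicate m ' ' else u.foldl pbStep chars,
       v, !u.isEmpty && v.isEmpty) := by
  induction u generalizing chars m with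
  | nil =>
    cases v with
    | nil => simp [placelabelsWhile]
    | cons w v' =>
      have hw := hV w (List.mem_cons_self ..)
      obtain ⟨wp, wl⟩ := w
      simp [placelabelsWhile, not_le.mpr hw]
  | cons a u' ih =>
    obtain ⟨p, l⟩ := a
    have hpa := hU (p, l) (List.mem_cons_self ..)
    have hs' : (chars ++ List.replicate m ' ').take i ++ l.toList = pbStep chars (p, l) :=
      pbStep_eq i chars m p l hlen hpa.1 hpa.2
    have hlen' : i ≤ (pbStep chars (p, l)).length + 0 := by
      have := pbStep_length chars (p, l)
      have h1 := hpa.1; have h2 := hpa.2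
      by_cases hi : 0 < i
      · have := h2 hi
        simp at this ⊢
        rw [pbStep_length]
        split <;> omega
      · omega
    rw [List.cons_append]
    show placelabelsWhile i (chars ++ List.replicate m ' ') ((p, l) :: (u' ++ v)) = _
    rw [placelabelsWhile]
    rw [if_pos hpa.1]
    simp only []
    by_cases hemp : (u' ++ v).isEmpty
    · have hu' : u' = [] := by cases u' <;> simp_all
      have hv : v = [] := by subst hu'; simpa using hemp
      subst hu' hv
      simp only [hemp, if_pos]
      simp [hs', List.foldl]
    · rw [if_neg (by simp [hemp])]
      rw [hs']
      have := ih (pbStep chars (p, l)) 0 (fun pr h => hU pr (List.mem_cons_of_mem _ h))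
        (by simpa using hlen')
      simp only [List.replicate_zero, List.append_nil] at this
      rw [this]
      cases u' with
      | nil =>
        have hv : v ≠ [] := by simpa using hemp
        simp [List.isEmpty_eq_false_iff.mpr hv, List.foldl]
      | cons b u'' => simp [List.foldl]

theorem foldl_pbStep_length (u : List (Int × String)) (chars : List Char) (i : Nat)
    (hne : u ≠ []) (hU : ∀ pr ∈ u, pr.1 ≤ (i : Int) ∧ (0 < i → (i : Int) ≤ pr.1)) :
    i ≤ (u.foldl pbStep chars).length := by
  rcases (List.eq_nil_or_concat u) with rfl | ⟨u', b, rfl⟩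
  · exact absurd rfl hne
  · rw [List.concat_eq_append, List.foldl_append]
    simp only [List.foldl_cons, List.foldl_nil]
    rw [pbStep_length]
    have hb := hU b (by simp)
    by_cases hi : 0 < i
    · have := hb.2 hi; split <;> omega
    · omega

theorem loop_lemma (fuel : Nat) : ∀ (sp : List (Int × String)) (i : Nat) (chars : List Char) (m : Nat)
    (_hpw : sp.Pairwise pvLexLe) (hne : sp ≠ [])
    (_h0 : ∀ pr ∈ sp, 0 < i → (i : Int) ≤ pr.1)
    (_hlen : i ≤ chars.length + m)
    (_hfuel : (fuel : Int) = (sp.getLast hne).1 + 1 - (i : Int))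
    (_hi : (i : Int) ≤ (sp.getLast hne).1),
    placelabelsLoop fuel i (chars ++ List.replicate m ' ') sp = sp.foldl pbStep chars := by
  induction fuel with
  | zero => intro sp i chars m _hpw hne _h0 _hlen hfuel hi; exfalso; omega
  | succ fuel ih =>
    intro sp i chars m hpw hne h0 hlen hfuel hi
    obtain ⟨u, v, hsplit, hU, hV, hpwv⟩ :
        ∃ u v, sp = u ++ v ∧ (∀ pr ∈ u, pr.1 ≤ (i:Int) ∧ (0 < i → (i:Int) ≤ pr.1)) ∧
          (∀ pr ∈ v, (i:Int) < pr.1) ∧ v.Pairwise pvLexLe := by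
      refine ⟨sp.takeWhile (fun pr => decide (pr.1 ≤ (i:Int))),
        sp.dropWhile (fun pr => decide (pr.1 ≤ (i:Int))),
        (List.takeWhile_append_dropWhile).symm, ?_, ?_, ?_⟩
      · intro pr h
        exact ⟨by simpa using List.mem_takeWhile_imp h,
          h0 pr (List.Sublist.mem h (List.takeWhile_sublist _))⟩
      · have hpwv : (sp.dropWhile (fun pr => decide (pr.1 ≤ (i:Int)))).Pairwise pvLexLe :=
          hpw.sublist (List.dropWhile_sublist _)
        cases hvc : sp.dropWhile (fun pr => decide (pr.1 ≤ (i:Int))) with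
        | nil => simp
        | cons w v' =>
          have hw : ¬ (w.1 ≤ (i:Int)) := by
            have h2 := List.head?_dropWhile_not (fun pr => decide (pr.1 ≤ (i:Int))) sp
            rw [hvc] at h2
            simpa using h2
          intro pr hpr
          rcases List.mem_cons.mp hpr with rfl | hpr'
          · omega
          · have h3 := (List.pairwise_cons.mp (hvc ▸ hpwv)).1 pr hpr'
            rcases h3 with h3 | ⟨h3, _⟩ <;> omega
      · exact hpw.sublist (List.dropWhile_sublist _)
    subst hsplit
    rw [placelabelsLoop, while_lemma u v i chars m hU hV hlen]
    cases v with
    | nil =>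
      have hune : u ≠ [] := by simpa using hne
      simp [List.isEmpty_eq_false_iff.mpr hune]
    | cons w v' =>
      have hvne : (w :: v' : List (Int × String)) ≠ [] := by simp
      have hlast : (u ++ w :: v').getLast hne = (w :: v').getLast hvne :=
        List.getLast_append_of_ne_nil hne hvne
      rw [hlast] at hfuel hi
      have hwv : w ∈ w :: v' := List.mem_cons_self ..
      have hwlast : (i : Int) + 1 ≤ ((w :: v').getLast hvne).1 := by
        have hwl := pairwise_getLast _ hpwv hvne w hwv
        have hiw := hV w hwv
        rcases hwl with hwl | hwl
        · rw [← hwl]; omega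
        · rcases hwl with h4 | ⟨h4, _⟩ <;> omega
      have hfuel' : (fuel : Int) = ((w :: v').getLast hvne).1 + 1 - ((i+1 : Nat) : Int) := by
        push_cast at hfuel ⊢; omega
      have h0' : ∀ pr ∈ w :: v', 0 < i + 1 → ((i+1 : Nat) : Int) ≤ pr.1 := by
        intro pr hpr _
        have := hV pr hpr
        push_cast; omega
      have hi' : ((i+1 : Nat) : Int) ≤ ((w :: v').getLast hvne).1 := by push_cast; omega
      by_cases hue : u = []
      · subst hue
        simp only [List.isEmpty_nil, if_pos, List.nil_append, Bool.not_true, Bool.false_and,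
          Bool.false_eq_true, if_false]
        have hrec := ih (w :: v') (i+1) chars (m+1)
          hpwv (by simp) h0' (by omega) hfuel' hi'
        rw [List.replicate_succ', ← List.append_assoc] at hrec
        exact hrec
      · have hue' : u.isEmpty = false := List.isEmpty_eq_false_iff.mpr hue
        simp only [hue', Bool.not_false, List.isEmpty_cons, Bool.and_false,
          Bool.false_eq_true, if_false]
        have hlenf : i + 1 ≤ (u.foldl pbStep chars).length + 1 := by
          have := foldl_pbStep_length u chars i hue hU
          omega
        have hrec := ih (w :: v') (i+1) (u.foldl pbStep chars) 1
          hpwv (by simp) h0' hlenf hfuel' hi'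
        rw [List.replicate_one] at hrec
        rw [hrec, List.foldl_append]

theorem allneg_foldl (sp : List (Int × String)) (chars : List Char) (hne : sp ≠ [])
    (hn : ∀ pr ∈ sp, pr.1 ≤ 0) :
    sp.foldl pbStep chars = (sp.getLast hne).2.toList := by
  induction sp generalizing chars with
  | nil => exact absurd rfl hne
  | cons a t ih =>
    have ha : (if a.1 > 0 then a.1 else 0).toNat = 0 := by
      have := hn a (List.mem_cons_self ..)
      split <;> omega
    have hstep : pbStep chars a = a.2.toList := by
      simp [pbStep, ha]
    cases t with
    | nil => simp [List.foldl, hstep, List.getLast]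
    | cons b t' =>
      rw [List.foldl_cons, hstep, List.getLast_cons (by simp)]
      exact ih _ (by simp) (fun pr h => hn pr (List.mem_cons_of_mem _ h))

-- ===== VERDICT (by name: the statement is the Claim_ definition above) =====
theorem zip_ne_nil (pos : List Int) (labs : List String) (h1 : pos ≠ []) (h2 : labs ≠ []) :
    pos.zip labs ≠ [] := by
  cases pos with
  | nil => exact absurd rfl h1
  | cons a t => cases labs with
    | nil => exact absurd rfl h2
    | cons b s => simp [List.zip]

theorem placelabels_spec : Claim_unchanged_placelabels := by
  intro pos labs hdom hpre hnd
  have hzip : pos.zip labs ≠ [] := zip_ne_nil pos labs hpre.1 hpre.2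
  have hperm := PySem.List.sorted2_perm (pos.zip labs) (fun x => x.1) (fun x => x.2) false
  have hpw := sorted2_pairwise_pvLexLe (pos.zip labs)
  unfold placelabels placelabels_alt
  cases hc : PySem.List.sorted2 (pos.zip labs) (fun x => x.1) (fun x => x.2) with
  | nil => rw [hc] at hperm; exact absurd (List.Perm.nil_eq hperm).symm hzip
  | cons q qs =>
    rw [hc] at hperm hpw
    have hqne : (q :: qs : List (Int × String)) ≠ [] := List.cons_ne_nil q qs
    by_cases hl : 0 ≤ ((q :: qs).getLast hqne).1
    · have hrun := loop_lemma ((((q :: qs).getLast hqne).1 + 1).toNat) (q :: qs) 0 [] 0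
        hpw hqne (by intro pr _ h; omega) (by simp)
        (by rw [Int.toNat_of_nonneg (by omega)]; simp) (by simpa using hl)
      simpa using congrArg String.ofList hrun
    · have hallsp : ∀ z ∈ q :: qs, z.1 < 0 := by
        intro z hz
        rcases pairwise_getLast _ hpw hqne z hz with he | hzl
        · rw [he]; omega
        · rcases hzl with h | ⟨h, _⟩ <;> omega
      have hallzip : ∀ z ∈ pos.zip labs, z.1 < 0 := fun z hz => hallsp z (hperm.mem_iff.mpr hz)
      have hlastmem : (q :: qs).getLast hqne ∈ pos.zip labs :=
        hperm.mem_iff.mp (List.getLast_mem hqne)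
      have hememp : ((q :: qs).getLast hqne).2 = "" := by
        by_contra hne2
        apply hnd
        refine ⟨hallzip, (q :: qs).getLast hqne, hlastmem, hne2, ?_⟩
        intro qr hqr
        rcases pairwise_getLast _ hpw hqne qr (hperm.mem_iff.mpr hqr) with he | hql
        · exact Or.inr ⟨by rw [he], by rw [he]⟩
        · rcases hql with h | ⟨h, hs⟩
          · exact Or.inl h
          · exact Or.inr ⟨h, String.le_iff_toList_le.mp hs⟩
      have hfz : ((((q :: qs).getLast hqne).1 + 1)).toNat = 0 := by omega
      show String.ofList (placelabelsLoop (((((q :: qs).getLast hqne).1 + 1)).toNat) 0 [] (q :: qs))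
        = String.ofList (List.foldl pbStep [] (q :: qs))
      rw [hfz]
      have hB := allneg_foldl (q :: qs) [] hqne (fun z hz => le_of_lt (hallsp z hz))
      rw [hB, hememp]
      rfl

theorem placelabels_changed : Claim_changed_placelabels := by
  unfold Claim_changed_placelabels; decide

theorem placelabels_tight : Claim_exact_placelabels := by
  intro pos labs hdom hpre hd
  obtain ⟨hneg, pr, hprmem, hprne, hmax⟩ := hd
  have hperm := PySem.List.sorted2_perm (pos.zip labs) (fun x => x.1) (fun x => x.2) false
  have hpw := sorted2_pairwise_pvLexLe (pos.zip labs)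
  unfold placelabels placelabels_alt
  cases hc : PySem.List.sorted2 (pos.zip labs) (fun x => x.1) (fun x => x.2) with
  | nil =>
    rw [hc] at hperm
    exact absurd (List.Perm.nil_eq hperm).symm (List.ne_nil_of_mem hprmem)
  | cons q qs =>
    rw [hc] at hperm hpw
    have hqne : (q :: qs : List (Int × String)) ≠ [] := List.cons_ne_nil q qs
    have hlastmem : (q :: qs).getLast hqne ∈ pos.zip labs :=
      hperm.mem_iff.mp (List.getLast_mem hqne)
    have hlneg : ((q :: qs).getLast hqne).1 < 0 := hneg _ hlastmem
    have hfz : ((((q :: qs).getLast hqne).1 + 1)).toNat = 0 := by omega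
    show String.ofList (placelabelsLoop (((((q :: qs).getLast hqne).1 + 1)).toNat) 0 [] (q :: qs))
      ≠ String.ofList (List.foldl pbStep [] (q :: qs))
    rw [hfz]
    have hB := allneg_foldl (q :: qs) [] hqne
      (fun z hz => le_of_lt (hneg z (hperm.mem_iff.mp hz)))
    rw [hB]
    -- the last sorted pair is exactly the lexicographically greatest pair pr
    have h1 := hmax _ hlastmem
    have h2 : pvLexLe pr ((q :: qs).getLast hqne) := by
      rcases pairwise_getLast _ hpw hqne pr (hperm.mem_iff.mpr hprmem) with he | h
      · exact Or.inr ⟨by rw [he], by rw [he]⟩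
      · exact h
    have hlab : ((q :: qs).getLast hqne).2.toList = pr.2.toList := by
      rcases h2 with h2 | ⟨h2e, h2s⟩ <;> rcases h1 with h1 | ⟨h1e, h1s⟩ <;> try omega
      exact le_antisymm h1s (String.le_iff_toList_le.mp h2s)
    rw [hlab]
    intro hcon
    apply hprne
    have := congrArg String.toList hcon
    simp at this
    exact (String.toList_eq_nil_iff.mp this.symm)
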